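-- pv_equiv track=rewrite | github.com/promodeagro/promodeagro-inventory-management-mcp-server | awslabs/inventory_management_mcp_server/actor_scripts/logistics_manager_standalone.py | select_orders_by_geography
-- ===== SOURCE A (Python) =====
-- def select_orders_by_geography(orders: list, max_orders: int) -> list:
--     """Select orders based on geographic proximity"""
--     geographic_groups = {}
--
--     for order in orders:
--         address = order.get('deliveryAddress', {})
--         city = address.get('city', 'Unknown')
--
--         if city not in geographic_groups:
--             geographic_groups[city] = []
--         geographic_groups[city].append(order)
--
--     # Return largest group up to max_orders
--     if geographic_groups:
--         largest_group = max(geographic_groups.values(), key=len)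
--         return largest_group[:max_orders]
--     return orders[:max_orders]
-- ===== SOURCE B (Python) =====
-- def select_orders_by_geography(orders: list, max_orders: int) -> list:
--     """Select orders based on geographic proximity (count-table + filter re-implementation)."""
--     counts = {}
--     for order in orders:
--         city = order.get('deliveryAddress', {}).get('city', 'Unknown')
--         counts[city] = counts.get(city, 0) + 1
--     if not counts:
--         return orders[:max_orders]
--     winner = max(counts, key=counts.get)
--     return [o for o in orders
--             if o.get('deliveryAddress', {}).get('city', 'Unknown') == winner][:max_orders]
-- ===== Notes on version B (the rewrite author's own statement) =====
-- stated objective: alternative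
-- what changed: Replaces A's dict of per-city order lists (largest group taken with max by len) by a count-only table plus a second filtering pass over the orders for the winning city.
import Mathlib
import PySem

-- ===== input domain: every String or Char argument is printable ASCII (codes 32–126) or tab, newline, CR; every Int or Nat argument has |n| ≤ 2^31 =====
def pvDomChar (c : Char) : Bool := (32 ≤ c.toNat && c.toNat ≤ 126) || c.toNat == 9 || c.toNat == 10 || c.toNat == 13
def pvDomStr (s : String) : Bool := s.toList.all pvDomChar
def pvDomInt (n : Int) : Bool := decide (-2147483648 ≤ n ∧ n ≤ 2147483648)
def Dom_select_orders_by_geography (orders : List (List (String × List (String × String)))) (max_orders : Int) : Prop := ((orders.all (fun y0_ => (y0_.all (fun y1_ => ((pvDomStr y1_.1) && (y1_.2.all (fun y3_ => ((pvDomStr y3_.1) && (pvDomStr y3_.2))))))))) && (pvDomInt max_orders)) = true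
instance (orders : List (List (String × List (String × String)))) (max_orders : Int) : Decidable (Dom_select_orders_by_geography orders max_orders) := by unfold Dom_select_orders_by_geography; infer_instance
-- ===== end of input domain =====

-- B replaces A's dict of per-city lists by a count table plus a filtering second pass; objective: alternative decomposition, same result.

-- ===== PORT A =====
-- city = order.get('deliveryAddress', {}).get('city', 'Unknown')   (A computes it in two steps; same value)
def pvCity (order : List (String × List (String × String))) : String :=
  PySem.Dict.getD (PySem.Dict.mk (PySem.Dict.getD (PySem.Dict.mk order) "deliveryAddress" [])) "city" "Unknown"

def select_orders_by_geography (orders : List (List (String × List (String × String)))) (max_orders : Int) : List (List (String × List (String × String))) :=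
  let geographic_groups :=
    orders.foldl (fun g order =>
      let city := pvCity order
      let g1 := if g.contains city then g else g.insert city []
      g1.modify city [] (fun lst => lst ++ [order])) PySem.Dict.empty
  if geographic_groups.size ≠ 0 then
    let largest_group := (PySem.List.max? geographic_groups.values (fun l => l.length)).getD []
    PySem.List.slice largest_group none (some max_orders)
  else
    PySem.List.slice orders none (some max_orders)

-- ===== PORT B =====
def select_orders_by_geography_alt (orders : List (List (String × List (String × String)))) (max_orders : Int) : List (List (String × List (String × String))) :=
  let counts : PySem.Dict String Int :=
    orders.foldl (fun d order => d.insert (pvCity order) (d.getD (pvCity order) 0 + 1)) PySem.Dict.empty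
  if counts.size = 0 then
    PySem.List.slice orders none (some max_orders)
  else
    let winner := (PySem.List.max? counts.keys (fun k => counts.getD k 0)).getD ""
    PySem.List.slice (orders.filter (fun o => pvCity o == winner)) none (some max_orders)

-- ===== PRECONDITION & SPEC =====
def Spec_select_orders_by_geography (orders : List (List (String × List (String × String)))) (max_orders : Int) (out : List (List (String × List (String × String)))) : Prop := out = select_orders_by_geography_alt orders max_orders
instance (orders : List (List (String × List (String × String)))) (max_orders : Int) (out : List (List (String × List (String × String)))) : Decidable (Spec_select_orders_by_geography orders max_orders out) := by unfold Spec_select_orders_by_geography; infer_instance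

-- ===== CLAIM (what is proved, stated in full; the proofs are below) =====
def Claim_equal_select_orders_by_geography : Prop := ∀ (orders : List (List (String × List (String × String)))) (max_orders : Int), Dom_select_orders_by_geography orders max_orders → Spec_select_orders_by_geography orders max_orders (select_orders_by_geography orders max_orders)

-- ===== LEMMAS AND PROOFS =====

-- A's grouping dict, with the "if city not in groups: groups[city] = []" step fused into modify
def pvGroups (orders : List (List (String × List (String × String)))) : PySem.Dict String (List (List (String × List (String × String)))) :=
  orders.foldl (fun g o => g.modify (pvCity o) [] (fun lst => lst ++ [o])) PySem.Dict.empty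

lemma pv_stepA_eq (g : PySem.Dict String (List (List (String × List (String × String))))) (o : List (String × List (String × String))) :
    (if g.contains (pvCity o) then g else g.insert (pvCity o) []).modify (pvCity o) [] (fun lst => lst ++ [o])
      = g.modify (pvCity o) [] (fun lst => lst ++ [o]) := by
  by_cases h : g.contains (pvCity o)
  · simp [h]
  · simp only [h, Bool.false_eq_true, if_false, PySem.Dict.modify,
      PySem.Dict.getD_insert_self, PySem.Dict.insert_insert_self,
      PySem.Dict.getD_of_not_contains _ _ (by simpa using h)]

lemma pv_groups_eq (orders : List (List (String × List (String × String)))) :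
    orders.foldl (fun g order =>
      let city := pvCity order
      let g1 := if g.contains city then g else g.insert city []
      g1.modify city [] (fun lst => lst ++ [order])) PySem.Dict.empty = pvGroups orders := by
  unfold pvGroups
  exact PySem.List.foldl_congr_mem _ _ _ _ (fun acc x _ => pv_stepA_eq acc x)

lemma pv_keys_groups (orders : List (List (String × List (String × String)))) :
    (pvGroups orders).keys = PySem.Set.ofList (orders.map pvCity) := by
  unfold pvGroups
  rw [PySem.Dict.keys_foldl_modify_key orders pvCity [] (fun _ o => fun lst => lst ++ [o])]
  simp [PySem.Set.update, PySem.Set.ofList, PySem.Dict.empty, PySem.Dict.keys]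

lemma pv_nodup_keys_groups (orders : List (List (String × List (String × String)))) :
    (pvGroups orders).keys.Nodup := by
  unfold pvGroups
  exact PySem.Dict.nodup_keys_foldl_modify_key orders pvCity [] (fun _ o => fun lst => lst ++ [o]) _
    (by simp [PySem.Dict.empty, PySem.Dict.keys])

lemma pv_getD_groups (orders : List (List (String × List (String × String)))) (c : String) :
    (pvGroups orders).getD c [] = orders.filter (fun o => pvCity o == c) := by
  unfold pvGroups
  rw [show orders.foldl (fun g o => g.modify (pvCity o) [] (fun lst => lst ++ [o])) PySem.Dict.empty
      = (orders.map (fun o => (pvCity o, o))).foldl (fun d p => d.modify p.1 [] (fun lst => lst ++ [p.2])) PySem.Dict.empty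
    from (List.foldl_map (f := fun o => (pvCity o, o))
        (g := fun (d : PySem.Dict String (List (List (String × List (String × String))))) p => d.modify p.1 [] (fun lst => lst ++ [p.2]))).symm]
  rw [PySem.Dict.getD_foldl_modify_append]
  simp [List.filter_map, Function.comp_def, PySem.Dict.getD_empty]

-- B's counting loop is Counter over the city list
lemma pv_counts_eq (orders : List (List (String × List (String × String)))) :
    orders.foldl (fun (d : PySem.Dict String Int) order => d.insert (pvCity order) (d.getD (pvCity order) 0 + 1)) PySem.Dict.empty
      = PySem.Dict.counter (orders.map pvCity) := by
  rw [show orders.foldl (fun (d : PySem.Dict String Int) order => d.insert (pvCity order) (d.getD (pvCity order) 0 + 1)) PySem.Dict.empty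
      = (orders.map pvCity).foldl (fun d x => d.insert x (d.getD x 0 + 1)) PySem.Dict.empty
    from (List.foldl_map (f := pvCity)
        (g := fun (d : PySem.Dict String Int) x => d.insert x (d.getD x 0 + 1))).symm]
  exact PySem.Dict.foldl_insert_getD_add_one_eq_counter _

-- max over a mapped list, generic
lemma pv_max?_foldl_map {α β κ : Type} [LT κ] [DecidableLT κ] (f : α → β) (key : β → κ)
    (l : List α) (acc : Option α) :
    List.foldl (fun acc x => match acc with
      | none => some x
      | some m => if key m < key x then some x else some m) (acc.map f) (l.map f)
    = (List.foldl (fun acc a => match acc with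
      | none => some a
      | some m => if key (f m) < key (f a) then some a else some m) acc l).map f := by
  induction l generalizing acc with
  | nil => simp
  | cons x t ih =>
    simp only [List.map_cons, List.foldl_cons]
    rw [← ih]
    congr 1
    cases acc with
    | none => rfl
    | some m => simp [apply_ite (Option.map f)]

lemma pv_max?_map {α β κ : Type} [LT κ] [DecidableLT κ] (f : α → β) (key : β → κ) (l : List α) :
    PySem.List.max? (l.map f) key = (PySem.List.max? l (fun a => key (f a))).map f := by
  simpa using pv_max?_foldl_map f key l none

-- a Nat-valued key and its Int cast pick the same maximum
lemma pv_max?_cast {α : Type} (l : List α) (k : α → Nat) (acc : Option α) :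
    List.foldl (fun acc x => match acc with
      | none => some x
      | some m => if ((k m : Int)) < (k x : Int) then some x else some m) acc l
    = List.foldl (fun acc x => match acc with
      | none => some x
      | some m => if k m < k x then some x else some m) acc l := by
  induction l generalizing acc with
  | nil => rfl
  | cons x t ih =>
    simp only [List.foldl_cons]
    rw [← ih]
    congr 1
    cases acc with
    | none => rfl
    | some m => simp

lemma pv_max?_cast' {α : Type} (l : List α) (k : α → Nat) :
    PySem.List.max? l (fun a => ((k a : Nat) : Int)) = PySem.List.max? l k := by
  simp only [PySem.List.max?]
  exact pv_max?_cast l k none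

lemma pv_filter_length_count (orders : List (List (String × List (String × String)))) (c : String) :
    (orders.filter (fun o => pvCity o == c)).length = (orders.map pvCity).count c := by
  rw [← List.countP_eq_length_filter, List.count_eq_countP, List.countP_map]
  rfl

-- ===== VERDICT (by name: the statement is the Claim_ definition above) =====
theorem select_orders_by_geography_spec : Claim_equal_select_orders_by_geography := by
  intro orders max_orders _
  unfold Spec_select_orders_by_geography select_orders_by_geography select_orders_by_geography_alt
  rw [pv_groups_eq, pv_counts_eq]
  cases horders : orders with
  | nil => simp [pvGroups, PySem.Dict.counter, PySem.Dict.empty, PySem.Dict.size]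
  | cons a t =>
    rw [← horders]
    set cities := orders.map pvCity with hc
    have hcne : cities ≠ [] := by simp [hc, horders]
    set S := PySem.Set.ofList cities with hS
    have hSne : S ≠ [] := by
      have : cities.head hcne ∈ S := by
        rw [hS]; exact (PySem.Set.mem_ofList _ _).mpr (List.head_mem hcne)
      exact List.ne_nil_of_mem this
    -- sizes are both S.length ≠ 0
    have hksA : (pvGroups orders).keys = S := by rw [pv_keys_groups]
    have hksB : (PySem.Dict.counter cities).keys = S := PySem.Dict.keys_counter cities
    have hSlen : S.length ≠ 0 := fun h => hSne (List.eq_nil_of_length_eq_zero h)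
    have hszA : (pvGroups orders).size ≠ 0 := by
      have h1 : (pvGroups orders).size = S.length := by
        rw [← hksA]; simp [PySem.Dict.size, PySem.Dict.keys]
      rw [h1]; exact hSlen
    have hszB : ¬ ((PySem.Dict.counter cities).size = 0) := by
      have h1 : (PySem.Dict.counter cities).size = S.length := by
        rw [← hksB]; simp [PySem.Dict.size, PySem.Dict.keys]
      rw [h1]; exact hSlen
    simp only [hszA, hszB, ite_not, if_neg, not_false_iff]
    -- A's values are groups per city, in key order
    have hvals : (pvGroups orders).values = S.map (fun c => orders.filter (fun o => pvCity o == c)) := by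
      rw [PySem.Dict.values_eq_map_keys _ (pv_nodup_keys_groups orders) [], hksA]
      exact List.map_congr_left (fun c _ => pv_getD_groups orders c)
    -- both pick the same winning city
    have hkeyB : (fun k => (PySem.Dict.counter cities).getD k 0)
        = (fun c => (((orders.filter (fun o => pvCity o == c)).length : Nat) : Int)) := by
      funext c
      rw [PySem.Dict.getD_counter, pv_filter_length_count]
    obtain ⟨w, hw⟩ : ∃ w, PySem.List.max? S (fun c => (orders.filter (fun o => pvCity o == c)).length) = some w := by
      cases h : PySem.List.max? S (fun c => (orders.filter (fun o => pvCity o == c)).length) with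
      | none => exact absurd ((PySem.List.max?_eq_none_iff _ _).mp h) hSne
      | some w => exact ⟨w, rfl⟩
    have hA : PySem.List.max? (pvGroups orders).values (fun l => l.length)
        = some (orders.filter (fun o => pvCity o == w)) := by
      rw [hvals, pv_max?_map, hw]; rfl
    have hB : PySem.List.max? (PySem.Dict.counter cities).keys (fun k => (PySem.Dict.counter cities).getD k 0)
        = some w := by
      rw [hksB, hkeyB, pv_max?_cast']
      exact hw
    rw [hA, hB]
    rfl
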